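-- pv_equiv track=rewrite | github.com/Djhekto/Univ_Code | zz_low_quality/skak_tasks/p6/main.py | bestkferad
-- ===== SOURCE A (Python) =====
-- def bestkferad(KFE1, KFE2, dist):
--     maxkfe=0
--     bestrad=0
--     for i in range(dist):
--         if (KFE1[i]+KFE2[i]>maxkfe):
--             maxkfe=KFE1[i]+KFE2[i]
--             bestrad=i
--     return (maxkfe, bestrad)
-- ===== SOURCE B (Python) =====
-- def bestkferad(KFE1, KFE2, dist):
--     n = max(dist, 0)
--     sums = [x + y for x, y in zip(KFE1[:n], KFE2[:n])]
--     m = max(sums) if sums else 0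
--     if m > 0:
--         return (m, sums.index(m))
--     return (0, 0)
-- ===== Notes on version B (the rewrite author's own statement) =====
-- stated objective: simpler
-- what changed: B materializes the list of pair-sums for the dist-prefix once, then reduces it (max of the list, then first index of that max, with the 0 baseline applied at the end) instead of A's single interleaved running-max/best-index scan.
import Mathlib
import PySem

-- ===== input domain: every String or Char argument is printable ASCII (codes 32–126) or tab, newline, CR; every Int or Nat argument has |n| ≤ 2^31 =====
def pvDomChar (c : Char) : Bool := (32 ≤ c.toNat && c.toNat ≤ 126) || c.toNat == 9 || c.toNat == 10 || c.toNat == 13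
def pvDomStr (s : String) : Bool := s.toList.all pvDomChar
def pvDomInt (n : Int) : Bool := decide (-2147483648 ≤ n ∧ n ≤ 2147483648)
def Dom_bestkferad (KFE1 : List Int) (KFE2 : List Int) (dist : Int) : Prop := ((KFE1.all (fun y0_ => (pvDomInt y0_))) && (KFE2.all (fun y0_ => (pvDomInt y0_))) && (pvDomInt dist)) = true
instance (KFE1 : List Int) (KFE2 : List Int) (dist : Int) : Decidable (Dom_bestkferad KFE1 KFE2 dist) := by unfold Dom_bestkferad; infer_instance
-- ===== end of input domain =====

-- B materializes the list of pair-sums and reduces it (max, then first index), instead of A's single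
-- interleaved running-max scan; objective: simpler decomposition, same O(n) cost.

-- ===== PORT A =====
-- A's loop: for i in range(dist), running (maxkfe, bestrad) starting at (0, 0)
def bestkferad (KFE1 : List Int) (KFE2 : List Int) (dist : Int) : Int × Int :=
  (PySem.List.pyRange 0 dist 1).foldl
    (fun st i =>
      if st.1 < PySem.List.pyGetD KFE1 i 0 + PySem.List.pyGetD KFE2 i 0 then
        (PySem.List.pyGetD KFE1 i 0 + PySem.List.pyGetD KFE2 i 0, i)
      else st)
    (0, 0)

-- ===== PORT B =====
-- max(sums) with no key is the running-max loop (PYSEM: max?_id_cons); 'max(sums) if sums else 0':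
def pyMaxOr0 : List Int → Int
  | [] => 0
  | x :: t => t.foldl max x

def bestkferad_alt (KFE1 : List Int) (KFE2 : List Int) (dist : Int) : Int × Int :=
  let n := (max dist 0).toNat
  let sums := List.zipWith (· + ·) (KFE1.take n) (KFE2.take n)
  let m := pyMaxOr0 sums
  if 0 < m then (m, ((PySem.List.index? sums m).getD 0 : Int)) else (0, 0)

-- ===== PRECONDITION & SPEC =====
-- Pre_ excludes exactly the inputs where A raises IndexError: dist larger than either list.
def Pre_bestkferad (KFE1 : List Int) (KFE2 : List Int) (dist : Int) : Prop :=
  dist ≤ (KFE1.length : Int) ∧ dist ≤ (KFE2.length : Int)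
instance (KFE1 : List Int) (KFE2 : List Int) (dist : Int) : Decidable (Pre_bestkferad KFE1 KFE2 dist) := by unfold Pre_bestkferad; infer_instance

def pvWitness_bestkferad : List Int × List Int × Int := ([3, -1, 5], [2, 4, 1], 3)

def Spec_bestkferad (KFE1 : List Int) (KFE2 : List Int) (dist : Int) (out : Int × Int) : Prop := out = bestkferad_alt KFE1 KFE2 dist
instance (KFE1 : List Int) (KFE2 : List Int) (dist : Int) (out : Int × Int) : Decidable (Spec_bestkferad KFE1 KFE2 dist out) := by unfold Spec_bestkferad; infer_instance

-- ===== CLAIM (what is proved, stated in full; the proofs are below) =====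
def Claim_equal_bestkferad : Prop := ∀ (KFE1 : List Int) (KFE2 : List Int) (dist : Int), Dom_bestkferad KFE1 KFE2 dist → Pre_bestkferad KFE1 KFE2 dist → Spec_bestkferad KFE1 KFE2 dist (bestkferad KFE1 KFE2 dist)
-- ===== LEMMAS AND PROOFS =====

-- A's loop, abstracted over the already-materialized list of pair-sums, starting at index k.
def loopA : List Int → Int → (Int × Int) → Int × Int
  | [], _, st => st
  | s :: t, k, st => loopA t (k + 1) (if st.1 < s then (s, k) else st)

theorem foldl_max_max (t : List Int) (a b : Int) :
    t.foldl max (max a b) = max a (t.foldl max b) := by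
  induction t generalizing b with
  | nil => rfl
  | cons c t ih => simpa [max_assoc] using ih (max b c)

theorem loopA_spec (t : List Int) : ∀ (k mk br : Int),
    loopA t k (mk, br) =
      if mk < t.foldl max mk then
        (t.foldl max mk, k + ((PySem.List.index? t (t.foldl max mk)).getD 0 : Int))
      else (mk, br) := by
  induction t with
  | nil => intro k mk br; simp [loopA]
  | cons s t ih =>
    intro k mk br
    by_cases hms : mk < s
    · have hmax : max mk s = s := by omega
      simp only [loopA, if_pos hms, List.foldl_cons, hmax]
      rw [ih]
      have hle : s ≤ t.foldl max s := (PySem.List.le_foldl_max t s).1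
      by_cases hs : s < t.foldl max s
      · have hmem : t.foldl max s ∈ t := by
          rcases PySem.List.foldl_max_mem t s with h | h
          · omega
          · exact h
        have hne : s ≠ t.foldl max s := by omega
        obtain ⟨j, hj⟩ := Option.isSome_iff_exists.mp
          ((PySem.List.index?_isSome_iff t (t.foldl max s)).mpr hmem)
        rw [if_pos hs, if_pos (show mk < t.foldl max s by omega),
          PySem.List.index?_cons_of_ne t hne, hj]
        simp [Prod.ext_iff]
        ring
      · have heq : t.foldl max s = s := by omega
        rw [if_neg hs, if_pos (by omega), heq, PySem.List.index?_cons_self]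
        simp
    · have hmax : max mk s = mk := by omega
      simp only [loopA, if_neg hms, List.foldl_cons, hmax]
      rw [ih]
      by_cases hm : mk < t.foldl max mk
      · have hmem : t.foldl max mk ∈ t := by
          rcases PySem.List.foldl_max_mem t mk with h | h
          · omega
          · exact h
        have hne : s ≠ t.foldl max mk := by omega
        obtain ⟨j, hj⟩ := Option.isSome_iff_exists.mp
          ((PySem.List.index?_isSome_iff t (t.foldl max mk)).mpr hmem)
        rw [if_pos hm, if_pos hm, PySem.List.index?_cons_of_ne t hne, hj]
        simp [Prod.ext_iff]
        ring
      · rw [if_neg hm, if_neg hm]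

-- A's indexed pyRange fold equals loopA on the zipWith-prefix, for in-range indices.
theorem bridge (KFE1 KFE2 : List Int) : ∀ (n k : Nat) (st : Int × Int),
    k + n ≤ KFE1.length → k + n ≤ KFE2.length →
    (PySem.List.pyRange (k : Int) ((k : Int) + (n : Int)) 1).foldl
      (fun st i =>
        if st.1 < PySem.List.pyGetD KFE1 i 0 + PySem.List.pyGetD KFE2 i 0 then
          (PySem.List.pyGetD KFE1 i 0 + PySem.List.pyGetD KFE2 i 0, i)
        else st) st
    = loopA (List.zipWith (· + ·) ((KFE1.drop k).take n) ((KFE2.drop k).take n)) (k : Int) st := by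
  intro n
  induction n with
  | zero =>
    intro k st _ _
    simp [PySem.List.pyRange_one_eq_nil, loopA]
  | succ n ih =>
    intro k st h1 h2
    have hk1 : k < KFE1.length := by omega
    have hk2 : k < KFE2.length := by omega
    have hd1 : (KFE1.drop k).take (n + 1) = KFE1[k] :: (KFE1.drop (k + 1)).take n := by
      rw [List.drop_eq_getElem_cons hk1, List.take_succ_cons]
    have hd2 : (KFE2.drop k).take (n + 1) = KFE2[k] :: (KFE2.drop (k + 1)).take n := by
      rw [List.drop_eq_getElem_cons hk2, List.take_succ_cons]
    have hg1 : PySem.List.pyGetD KFE1 (k : Int) 0 = KFE1[k] :=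
      PySem.List.pyGetD_ofNat KFE1 k 0 hk1
    have hg2 : PySem.List.pyGetD KFE2 (k : Int) 0 = KFE2[k] :=
      PySem.List.pyGetD_ofNat KFE2 k 0 hk2
    have hcons : PySem.List.pyRange (k : Int) ((k : Int) + 1 + (n : Int)) 1
        = (k : Int) :: PySem.List.pyRange ((k : Int) + 1) ((k : Int) + 1 + (n : Int)) 1 :=
      PySem.List.pyRange_one_cons (by omega)
    have hb := ih (k + 1)
      (if st.1 < KFE1[k] + KFE2[k] then (KFE1[k] + KFE2[k], (k : Int)) else st)
      (by omega) (by omega)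
    push_cast at hb ⊢
    rw [show ((k : Int) + ((n : Int) + 1)) = (k : Int) + 1 + (n : Int) by ring, hcons,
      List.foldl_cons, hd1, hd2, List.zipWith_cons_cons, loopA, hg1, hg2]
    exact hb

-- B's reduce equals the closed form loopA lands on.
theorem alt_closed (sums : List Int) :
    (if 0 < pyMaxOr0 sums then (pyMaxOr0 sums, ((PySem.List.index? sums (pyMaxOr0 sums)).getD 0 : Int)) else (0, 0))
    = if 0 < sums.foldl max 0 then
        (sums.foldl max 0, (0 : Int) + ((PySem.List.index? sums (sums.foldl max 0)).getD 0 : Int))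
      else ((0 : Int), (0 : Int)) := by
  cases sums with
  | nil => simp [pyMaxOr0]
  | cons x t =>
    have h : (x :: t).foldl max 0 = max 0 (t.foldl max x) := by
      rw [List.foldl_cons, ← foldl_max_max]
    have hm : pyMaxOr0 (x :: t) = t.foldl max x := rfl
    rw [h, hm]
    by_cases hp : 0 < t.foldl max x
    · have : max 0 (t.foldl max x) = t.foldl max x := by omega
      rw [this, if_pos hp, if_pos hp]
      simp
    · have : max 0 (t.foldl max x) = 0 := by omega
      rw [this, if_neg hp, if_neg (show ¬ (0:Int) < 0 by omega)]

-- ===== VERDICT (by name: the statement is the Claim_ definition above) =====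
theorem bestkferad_spec : Claim_equal_bestkferad := by
  intro KFE1 KFE2 dist _ hpre
  unfold Spec_bestkferad bestkferad bestkferad_alt
  obtain ⟨h1, h2⟩ := hpre
  by_cases hd : dist ≤ 0
  · have : (max dist 0).toNat = 0 := by omega
    rw [PySem.List.pyRange_one_eq_nil (by omega), this]
    rfl
  · have hn : dist = ((dist.toNat : Nat) : Int) := by omega
    have hmax : (max dist 0).toNat = dist.toNat := by omega
    rw [hmax]
    have hb := bridge KFE1 KFE2 dist.toNat 0 (0, 0) (by omega) (by omega)
    simp only [Nat.cast_zero, zero_add, List.drop_zero] at hb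
    conv_lhs => rw [hn]
    rw [hb, loopA_spec]
    exact (alt_closed _).symm
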